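-- pv_equiv track=rewrite | github.com/hghyhghy/Codechef-Coding-Ninja | Desktop/DSA/T47/6.py | subarray_with_distinct_elements
-- ===== SOURCE A (Python) =====
-- def subarray_with_distinct_elements(array):
--
--     n=len(array)
--     result = []
--
--     for start in range(n):
--
--         seen=set()
--
--         for end in range(start,n):
--
--             if array[end] in seen:
--
--                 break
--
--             seen.add(array[end])
--             result.append(array[start:end+1])
--
--     return result
-- ===== SOURCE B (Python) =====
-- def subarray_with_distinct_elements(array):
--     n = len(array)
--     result = []
--     seen = set()
--     r = 0
--     for start in range(n):
--         while r < n and array[r] not in seen: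
--             seen.add(array[r])
--             r += 1
--         for end in range(start, r):
--             result.append(array[start:end + 1])
--         seen.discard(array[start])
--     return result
-- ===== Notes on version B (the rewrite author's own statement) =====
-- stated objective: alternative
-- what changed: A rebuilds a fresh `seen` set for every start index; B uses a single sliding window whose right pointer never moves backward, maintaining one set incrementally (add on extend, discard on shrink) and emitting all slices of the window, which amortizes the set work across starts.
import Mathlib
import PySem

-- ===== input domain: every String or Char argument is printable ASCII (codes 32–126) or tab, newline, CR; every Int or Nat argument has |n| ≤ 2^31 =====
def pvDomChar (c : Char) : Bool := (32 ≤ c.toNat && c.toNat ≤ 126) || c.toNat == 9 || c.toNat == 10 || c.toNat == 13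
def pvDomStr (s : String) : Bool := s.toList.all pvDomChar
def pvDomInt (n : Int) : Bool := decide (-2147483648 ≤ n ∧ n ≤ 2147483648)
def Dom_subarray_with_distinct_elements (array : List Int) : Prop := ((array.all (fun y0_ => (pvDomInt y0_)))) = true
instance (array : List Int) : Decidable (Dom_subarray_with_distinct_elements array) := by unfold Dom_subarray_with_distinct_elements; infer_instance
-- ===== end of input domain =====

-- B replaces A's per-start rebuilt `seen` set by one sliding window with a monotone right
-- pointer (amortized set work), separating boundary-finding from slice emission; same output.

-- ===== PORT A =====
-- inner loop of A: 'for end in range(start, n): if array[end] in seen: break; …'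
def pvInnerA (array : List Int) (start : Nat) (e : Nat) (seen : PySem.Set Int)
    (result : List (List Int)) : List (List Int) :=
  if _h : e < array.length then
    -- array[end]: the index is in range on every reachable state (e < len)
    let x := (PySem.List.pyGet? array (e : Int)).getD 0
    if x ∈ seen then result
    else pvInnerA array start (e + 1) (PySem.Set.add seen x)
          (result ++ [PySem.List.slice array (some (start : Int)) (some ((e : Int) + 1))])
  else result
  termination_by array.length - e

def subarray_with_distinct_elements (array : List Int) : List (List Int) :=
  let n := array.length
  (List.range n).foldl (fun result start => pvInnerA array start start PySem.Set.empty result) []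

-- ===== PORT B =====
-- B's while loop: 'while r < n and array[r] not in seen: seen.add(array[r]); r += 1'
def pvExtendB (array : List Int) (seen : PySem.Set Int) (r : Nat) : PySem.Set Int × Nat :=
  if _h : r < array.length then
    -- array[r]: the index is in range on every reachable state (r < len)
    let x := (PySem.List.pyGet? array (r : Int)).getD 0
    if x ∈ seen then (seen, r)
    else pvExtendB array (PySem.Set.add seen x) (r + 1)
  else (seen, r)
  termination_by array.length - r

-- body of B's 'for start in range(n)' loop; state = (result, seen, r)
def pvStepB (array : List Int) (st : List (List Int) × PySem.Set Int × Nat) (start : Nat) :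
    List (List Int) × PySem.Set Int × Nat :=
  let (seen, r) := pvExtendB array st.2.1 st.2.2
  let result := (List.range' start (r - start)).foldl
      (fun res e => res ++ [PySem.List.slice array (some (start : Int)) (some ((e : Int) + 1))]) st.1
  (result, PySem.Set.discard seen ((PySem.List.pyGet? array (start : Int)).getD 0), r)

def subarray_with_distinct_elements_alt (array : List Int) : List (List Int) :=
  let n := array.length
  ((List.range n).foldl (pvStepB array) ([], PySem.Set.empty, 0)).1

-- ===== PRECONDITION & SPEC =====
def Spec_subarray_with_distinct_elements (array : List Int) (out : List (List Int)) : Prop := out = subarray_with_distinct_elements_alt array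
instance (array : List Int) (out : List (List Int)) : Decidable (Spec_subarray_with_distinct_elements array out) := by unfold Spec_subarray_with_distinct_elements; infer_instance

-- ===== CLAIM (what is proved, stated in full; the proofs are below) =====
def Claim_equal_subarray_with_distinct_elements : Prop := ∀ (array : List Int), Dom_subarray_with_distinct_elements array → Spec_subarray_with_distinct_elements array (subarray_with_distinct_elements array)

-- ===== LEMMAS AND PROOFS =====

-- length of the longest duplicate-free prefix of xs, relative to already-seen elements
def pvDlen (seen : List Int) : List Int → Nat
  | [] => 0
  | x :: t => if x ∈ seen then 0 else pvDlen (x :: seen) t + 1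

-- the slices emitted for one value of start
def pvEmit (array : List Int) (s : Nat) : List (List Int) :=
  (List.range' s (pvDlen [] (array.drop s))).map
    (fun e => PySem.List.slice array (some (s : Int)) (some ((e : Int) + 1)))

theorem pvDlen_congr (xs : List Int) : ∀ s₁ s₂ : List Int, (∀ a, a ∈ s₁ ↔ a ∈ s₂) →
    pvDlen s₁ xs = pvDlen s₂ xs := by
  induction xs with
  | nil => intro _ _ _; rfl
  | cons x t ih =>
    intro s₁ s₂ h
    simp only [pvDlen, h x]
    split
    · rfl
    · have := ih (x :: s₁) (x :: s₂) (by intro a; simp [h a])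
      omega

theorem pvDlen_le (xs : List Int) : ∀ seen, pvDlen seen xs ≤ xs.length := by
  induction xs with
  | nil => intro _; simp [pvDlen]
  | cons x t ih =>
    intro seen
    simp only [pvDlen]
    split
    · simp
    · have := ih (x :: seen); simp; omega

theorem pvDlen_append (ys : List Int) : ∀ (zs seen : List Int), ys.Nodup →
    (∀ y ∈ ys, y ∉ seen) →
    pvDlen seen (ys ++ zs) = ys.length + pvDlen (ys ++ seen) zs := by
  induction ys with
  | nil => intro zs seen _ _; simp
  | cons y t ih =>
    intro zs seen hnd hdis
    have hy : y ∉ seen := hdis y (by simp)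
    have hyt : y ∉ t := (List.nodup_cons.mp hnd).1
    have hd2 : ∀ a ∈ t, a ∉ y :: seen := by
      intro a ha
      simp only [List.mem_cons, not_or]
      exact ⟨fun h => hyt (h ▸ ha), hdis a (by simp [ha])⟩
    simp only [List.cons_append, pvDlen, if_neg hy]
    rw [ih zs (y :: seen) (List.nodup_cons.mp hnd).2 hd2]
    rw [pvDlen_congr zs (t ++ y :: seen) (y :: (t ++ seen)) (by intro a; simp; tauto)]
    simp; omega

theorem pvDlen_take_nodup (xs : List Int) : ∀ seen,
    (xs.take (pvDlen seen xs)).Nodup ∧ ∀ a ∈ xs.take (pvDlen seen xs), a ∉ seen := by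
  induction xs with
  | nil => intro _; simp
  | cons x t ih =>
    intro seen
    simp only [pvDlen]
    split
    · simp
    · rename_i hx
      obtain ⟨h1, h2⟩ := ih (x :: seen)
      refine ⟨?_, ?_⟩
      · simp only [List.take_succ_cons, List.nodup_cons]
        exact ⟨fun hm => h2 x hm (by simp), h1⟩
      · intro a ha
        simp only [List.take_succ_cons, List.mem_cons] at ha
        rcases ha with rfl | ha
        · exact hx
        · exact fun hs => h2 a ha (by simp [hs])

theorem pvAdd_mem_cons (seen : PySem.Set Int) (x a : Int) :
    a ∈ PySem.Set.add seen x ↔ a ∈ x :: seen := by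
  rw [PySem.Set.mem_add]; simp; tauto

-- characterization of A's inner loop
theorem pvInnerA_spec (array : List Int) (start : Nat) : ∀ e (seen : PySem.Set Int) result,
    pvInnerA array start e seen result =
      result ++ (List.range' e (pvDlen seen (array.drop e))).map
        (fun j => PySem.List.slice array (some (start : Int)) (some ((j : Int) + 1))) := by
  have key : ∀ (fuel e : Nat) (seen : PySem.Set Int) result, array.length ≤ e + fuel →
      pvInnerA array start e seen result =
        result ++ (List.range' e (pvDlen seen (array.drop e))).map
          (fun j => PySem.List.slice array (some (start : Int)) (some ((j : Int) + 1))) := by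
    intro fuel
    induction fuel with
    | zero =>
      intro e seen result hle
      rw [pvInnerA, dif_neg (by omega), List.drop_eq_nil_of_le (by omega)]
      simp [pvDlen]
    | succ m ih =>
      intro e seen result hle
      rw [pvInnerA]
      by_cases h : e < array.length
      · rw [dif_pos h]
        simp only [PySem.List.pyGet?_natCast, List.getElem?_eq_getElem h, Option.getD_some]
        rw [List.drop_eq_getElem_cons h]
        simp only [pvDlen]
        by_cases hx : array[e] ∈ seen
        · rw [if_pos hx, if_pos hx]
          simp
        · rw [if_neg hx, if_neg hx]
          rw [ih (e + 1) (PySem.Set.add seen array[e]) _ (by omega)]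
          rw [pvDlen_congr _ (PySem.Set.add seen array[e]) (array[e] :: seen)
            (pvAdd_mem_cons seen array[e])]
          rw [List.range'_succ]
          simp
      · rw [dif_neg h, List.drop_eq_nil_of_le (by omega)]
        simp [pvDlen]
  intro e seen result
  exact key array.length e seen result (by omega)

-- characterization of B's while loop
theorem pvExtendB_spec (array : List Int) : ∀ r (seen : PySem.Set Int),
    pvExtendB array seen r =
      (PySem.Set.update seen ((array.drop r).take (pvDlen seen (array.drop r))),
       r + pvDlen seen (array.drop r)) := by
  have key : ∀ (fuel r : Nat) (seen : PySem.Set Int), array.length ≤ r + fuel →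
      pvExtendB array seen r =
        (PySem.Set.update seen ((array.drop r).take (pvDlen seen (array.drop r))),
         r + pvDlen seen (array.drop r)) := by
    intro fuel
    induction fuel with
    | zero =>
      intro r seen hle
      rw [pvExtendB, dif_neg (by omega), List.drop_eq_nil_of_le (by omega)]
      simp [pvDlen, PySem.Set.update]
    | succ m ih =>
      intro r seen hle
      rw [pvExtendB]
      by_cases h : r < array.length
      · rw [dif_pos h]
        simp only [PySem.List.pyGet?_natCast, List.getElem?_eq_getElem h, Option.getD_some]
        rw [List.drop_eq_getElem_cons h]
        simp only [pvDlen]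
        by_cases hx : array[r] ∈ seen
        · rw [if_pos hx, if_pos hx]
          simp [PySem.Set.update]
        · rw [if_neg hx, if_neg hx]
          rw [ih (r + 1) (PySem.Set.add seen array[r]) (by omega)]
          rw [pvDlen_congr _ (PySem.Set.add seen array[r]) (array[r] :: seen)
            (pvAdd_mem_cons seen array[r])]
          have harith : r + 1 + pvDlen (array[r] :: seen) (List.drop (r + 1) array) =
              r + (pvDlen (array[r] :: seen) (List.drop (r + 1) array) + 1) := by omega
          simp only [List.take_succ_cons, PySem.Set.update, List.foldl_cons, harith]
      · rw [dif_neg h, List.drop_eq_nil_of_le (by omega)]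
        simp [pvDlen, PySem.Set.update]
  intro r seen
  exact key array.length r seen (by omega)

theorem mem_update_iff (s : PySem.Set Int) (xs : List Int) (a : Int) :
    a ∈ PySem.Set.update s xs ↔ a ∈ s ∨ a ∈ xs := by
  induction xs generalizing s with
  | nil => simp [PySem.Set.update]
  | cons x t ih =>
    simp only [PySem.Set.update, List.foldl_cons] at *
    rw [ih (PySem.Set.add s x), PySem.Set.mem_add]
    simp; tauto

-- loop invariant of B's outer loop: the window array[s:r] is duplicate-free and seen is its set
def pvInv (array : List Int) (s : Nat) (seen : PySem.Set Int) (r : Nat) : Prop :=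
  s ≤ r ∧ r ≤ array.length ∧ ((array.drop s).take (r - s)).Nodup ∧
    (∀ a, a ∈ seen ↔ a ∈ (array.drop s).take (r - s))

theorem pvStepB_spec (array : List Int) (s : Nat) (acc : List (List Int))
    (seen : PySem.Set Int) (r : Nat) (hs : s < array.length) (hInv : pvInv array s seen r) :
    ∃ seen' r', pvStepB array (acc, seen, r) s = (acc ++ pvEmit array s, seen', r') ∧
      pvInv array (s + 1) seen' r' := by
  obtain ⟨hsr, hrn, hnd, hmem⟩ := hInv
  have hwlen : ((array.drop s).take (r - s)).length = r - s := by
    simp [List.length_take, List.length_drop]; omega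
  have hrs : s + (r - s) = r := by omega
  have hsplit : array.drop s = (array.drop s).take (r - s) ++ array.drop r := by
    conv_lhs => rw [← List.take_append_drop (r - s) (array.drop s)]
    rw [List.drop_drop, hrs]
  have hkey : pvDlen [] (array.drop s) =
      (r - s) + pvDlen seen (array.drop r) := by
    conv_lhs => rw [hsplit]
    rw [pvDlen_append _ (array.drop r) [] hnd (by simp), hwlen]
    rw [pvDlen_congr _ _ seen (by intro a; simp [hmem a])]
  have hdle : pvDlen seen (array.drop r) ≤ array.length - r := by
    have := pvDlen_le (array.drop r) seen
    simp [List.length_drop] at this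
    omega
  have hpos : 1 ≤ pvDlen [] (array.drop s) := by
    rw [List.drop_eq_getElem_cons hs]
    simp [pvDlen]
  have hr's : r + pvDlen seen (array.drop r) - s = pvDlen [] (array.drop s) := by omega
  have hw0nd : ((array.drop s).take (r + pvDlen seen (array.drop r) - s)).Nodup := by
    rw [hr's]
    exact (pvDlen_take_nodup (array.drop s) []).1
  have hw0split : (array.drop s).take (r + pvDlen seen (array.drop r) - s) =
      (array.drop s).take (r - s) ++ (array.drop r).take (pvDlen seen (array.drop r)) := by
    have harith : r + pvDlen seen (array.drop r) - s - (r - s) =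
        pvDlen seen (array.drop r) := by omega
    conv_lhs => rw [hsplit]
    rw [List.take_append, hwlen, harith,
      List.take_of_length_le (by rw [hwlen]; omega)]
  have hw0cons : (array.drop s).take (r + pvDlen seen (array.drop r) - s) =
      array[s] :: (array.drop (s + 1)).take (r + pvDlen seen (array.drop r) - (s + 1)) := by
    rw [List.drop_eq_getElem_cons hs]
    have h2 : r + pvDlen seen (array.drop r) - s =
        (r + pvDlen seen (array.drop r) - (s + 1)) + 1 := by omega
    rw [h2, List.take_succ_cons]
  refine ⟨PySem.Set.discard
      (PySem.Set.update seen ((array.drop r).take (pvDlen seen (array.drop r)))) array[s],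
    r + pvDlen seen (array.drop r), ?_, ?_⟩
  · have hget : ((PySem.List.pyGet? array (s : Int)).getD 0) = array[s] := by
      simp [PySem.List.pyGet?_natCast, List.getElem?_eq_getElem hs]
    simp only [pvStepB, pvExtendB_spec array r seen, hget]
    rw [PySem.List.foldl_append_singleton_eq_map, hr's]
    rfl
  · refine ⟨by omega, by omega, ?_, ?_⟩
    · have h4 := hw0nd
      rw [hw0cons] at h4
      exact (List.nodup_cons.mp h4).2
    · intro a
      rw [PySem.Set.mem_discard, mem_update_iff]
      have hmem0 : a ∈ seen ∨ a ∈ (array.drop r).take (pvDlen seen (array.drop r)) ↔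
          a ∈ (array.drop s).take (r + pvDlen seen (array.drop r) - s) := by
        rw [hw0split]
        simp [hmem a]
      rw [hmem0]
      have h4 := hw0nd
      rw [hw0cons] at h4
      have hnotin := (List.nodup_cons.mp h4).1
      rw [hw0cons]
      simp only [List.mem_cons]
      constructor
      · rintro ⟨rfl | ha, hne⟩
        · exact absurd rfl hne
        · exact ha
      · intro ha
        exact ⟨Or.inr ha, fun h => hnotin (h ▸ ha)⟩

theorem pvFoldB (array : List Int) : ∀ (k s : Nat) acc seen r, s + k = array.length →
    pvInv array s seen r →
    ((List.range' s k).foldl (pvStepB array) (acc, seen, r)).1 =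
      acc ++ (List.range' s k).flatMap (pvEmit array) := by
  intro k
  induction k with
  | zero => intro s acc seen r _ _; simp
  | succ m ih =>
    intro s acc seen r hsk hInv
    rw [List.range'_succ]
    obtain ⟨seen', r', hstep, hInv'⟩ := pvStepB_spec array s acc seen r (by omega) hInv
    simp only [List.foldl_cons, hstep]
    rw [ih (s + 1) (acc ++ pvEmit array s) seen' r' (by omega) hInv']
    simp

-- ===== VERDICT (by name: the statement is the Claim_ definition above) =====
theorem subarray_with_distinct_elements_spec : Claim_equal_subarray_with_distinct_elements := by
  intro array _
  show subarray_with_distinct_elements array = subarray_with_distinct_elements_alt array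
  have h1 : List.foldl (fun result start => pvInnerA array start start PySem.Set.empty result)
        [] (List.range array.length) =
      List.foldl (fun res s => res ++ pvEmit array s) [] (List.range array.length) := by
    apply PySem.List.foldl_congr_mem
    intro acc x _
    rw [pvInnerA_spec array x x PySem.Set.empty acc]
    rfl
  have h2 : ((List.range array.length).foldl (pvStepB array) ([], PySem.Set.empty, 0)).1 =
      [] ++ (List.range array.length).flatMap (pvEmit array) := by
    rw [List.range_eq_range']
    exact pvFoldB array array.length 0 [] PySem.Set.empty 0 (by omega)
      ⟨Nat.le_refl 0, Nat.zero_le _, by simp, by simp [PySem.Set.empty]⟩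
  simp only [subarray_with_distinct_elements, subarray_with_distinct_elements_alt]
  rw [h1, PySem.List.foldl_append_eq_flatMap, h2]
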